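-- pv_equiv track=rewrite | github.com/tempoxyz/tempo | .github/scripts/changed-crates.py | changed_files_to_crates
-- ===== SOURCE A (Python) =====
-- def changed_files_to_crates(
--     changed_files: list[str], dir_to_name: dict[str, str]
-- ) -> tuple[set[str], list[str]]:
--     """Map changed files to the workspace crates they belong to.
--
--     Returns (matched_crates, unmapped_files).
--     """
--     crates: set[str] = set()
--     unmapped: list[str] = []
--     sorted_dirs = sorted(dir_to_name.keys(), key=len, reverse=True)
--
--     for f in changed_files:
--         matched = False
--         for crate_dir in sorted_dirs:
--             if f.startswith(crate_dir + "/") or f == crate_dir: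
--                 crates.add(dir_to_name[crate_dir])
--                 matched = True
--                 break
--         if not matched:
--             unmapped.append(f)
--
--     return crates, unmapped
-- ===== SOURCE B (Python) =====
-- def changed_files_to_crates(changed_files, dir_to_name):
--     """Map changed files to the workspace crates they belong to.
--
--     Returns (matched_crates, unmapped_files).
--
--     Instead of scanning every crate directory per file, look up the file's
--     own ancestor path prefixes in the dict, deepest first.
--     """
--     crates = set()
--     unmapped = []
--     for f in changed_files:
--         ancestors = [f[:i] for i, c in enumerate(f) if c == "/"]
--         name = None
--         for p in [f] + ancestors[::-1]:
--             if p in dir_to_name: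
--                 name = dir_to_name[p]
--                 break
--         if name is None:
--             unmapped.append(f)
--         else:
--             crates.add(name)
--     return crates, unmapped
-- ===== Notes on version B (the rewrite author's own statement) =====
-- stated objective: faster
-- what changed: Instead of sorting all crate directories by length and scanning them per file, B enumerates each file's own '/'-boundary ancestor prefixes deepest-first and looks them up directly in the dict.
import Mathlib
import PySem

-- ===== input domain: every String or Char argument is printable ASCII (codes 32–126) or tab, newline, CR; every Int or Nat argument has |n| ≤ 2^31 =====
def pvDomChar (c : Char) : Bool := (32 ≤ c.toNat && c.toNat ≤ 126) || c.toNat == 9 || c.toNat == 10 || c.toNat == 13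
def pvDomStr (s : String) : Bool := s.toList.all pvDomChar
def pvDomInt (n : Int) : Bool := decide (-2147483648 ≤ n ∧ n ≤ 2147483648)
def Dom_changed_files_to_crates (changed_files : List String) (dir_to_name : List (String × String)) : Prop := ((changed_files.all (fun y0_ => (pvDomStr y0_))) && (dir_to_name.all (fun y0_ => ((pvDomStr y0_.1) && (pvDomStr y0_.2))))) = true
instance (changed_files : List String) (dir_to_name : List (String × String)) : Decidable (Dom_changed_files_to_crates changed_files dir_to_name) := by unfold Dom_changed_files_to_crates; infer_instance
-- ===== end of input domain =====

-- B replaces A's sort-all-dirs-and-scan-per-file search by a direct dict lookup of each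
-- file's own '/'-boundary ancestor prefixes, deepest first (objective: faster).


-- ===== PORT A =====
-- f.startswith(crate_dir + "/") or f == crate_dir, on .toList (PySem.Chars.startswith is the exact port)
def pvMatchA (f d : List Char) : Bool :=
  PySem.Chars.startswith f (d ++ ['/']) || (f == d)

-- A: sort the crate dirs by length, longest first, and scan them per file until one matches.
-- (Python's lookup dir_to_name[crate_dir] is ported as getD with an unreachable default:
--  crate_dir is drawn from the dict's own keys, so the lookup cannot raise.)
def changed_files_to_crates (changed_files : List String) (dir_to_name : List (String × String)) : List String × List String :=
  let dict := PySem.Dict.ofList dir_to_name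
  let sorted_dirs := PySem.List.sorted (PySem.Dict.keys dict) (fun s => PySem.Str.len s) true
  changed_files.foldl
    (fun acc f =>
      match sorted_dirs.find? (fun cd => pvMatchA f.toList cd.toList) with
      | some cd => (PySem.Set.add acc.1 (PySem.Dict.getD dict cd ""), acc.2)
      | none => (acc.1, acc.2 ++ [f]))
    ([], [])

-- ===== PORT B =====
-- [f[:i] for i, c in enumerate(f) if c == "/"]
def pvAncestors (f : List Char) : List (List Char) :=
  ((PySem.List.enumerate f).filter (fun ic => ic.2 == '/')).map
    (fun ic => PySem.Chars.slice f none (some ic.1))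

-- B: per file, look up the file's own ancestor prefixes in the dict, deepest first.
def changed_files_to_crates_alt (changed_files : List String) (dir_to_name : List (String × String)) : List String × List String :=
  let dict := PySem.Dict.ofList dir_to_name
  changed_files.foldl
    (fun acc f =>
      match (f.toList :: (pvAncestors f.toList).reverse).findSome?
          (fun p => PySem.Dict.get? dict (String.ofList p)) with
      | some name => (PySem.Set.add acc.1 name, acc.2)
      | none => (acc.1, acc.2 ++ [f]))
    ([], [])

-- ===== PRECONDITION & SPEC =====
def Spec_changed_files_to_crates (changed_files : List String) (dir_to_name : List (String × String)) (out : List String × List String) : Prop := out = changed_files_to_crates_alt changed_files dir_to_name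
instance (changed_files : List String) (dir_to_name : List (String × String)) (out : List String × List String) : Decidable (Spec_changed_files_to_crates changed_files dir_to_name out) := by unfold Spec_changed_files_to_crates; infer_instance

-- ===== CLAIM (what is proved, stated in full; the proofs are below) =====
def Claim_equal_changed_files_to_crates : Prop := ∀ (changed_files : List String) (dir_to_name : List (String × String)), Dom_changed_files_to_crates changed_files dir_to_name → Spec_changed_files_to_crates changed_files dir_to_name (changed_files_to_crates changed_files dir_to_name)

-- ===== LEMMAS AND PROOFS =====

-- "p is a candidate prefix of f": f itself, or a prefix cut at a '/' boundary.
def pvIsCand (f p : List Char) : Prop :=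
  p = f ∨ ∃ i : Nat, i < f.length ∧ f[i]? = some '/' ∧ p = f.take i

-- findSome? as find?-then-bind
theorem pvFindSome?_eq_bind {α β : Type} (g : α → Option β) (l : List α) :
    l.findSome? g = (l.find? (fun a => (g a).isSome)).bind g := by
  induction l with
  | nil => rfl
  | cons a t ih =>
    rw [List.findSome?_cons, List.find?_cons]
    cases h : g a with
    | some b => simp [h]
    | none => simp [ih]

-- a list nonincreasing in weight: find? returns the (unique) maximal-weight hit
theorem pvFirstHit {α : Type} (p : α → Bool) (w : α → Nat) (l : List α) (m : α)
    (hpair : l.Pairwise (fun a b => w b ≤ w a))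
    (hm : m ∈ l) (hpm : p m = true)
    (hmax : ∀ x ∈ l, p x = true → w x ≤ w m)
    (huniq : ∀ x ∈ l, p x = true → w x = w m → x = m) :
    l.find? p = some m := by
  induction l with
  | nil => cases hm
  | cons a t ih =>
    rw [List.find?_cons]
    by_cases hpa : p a = true
    · simp only [hpa]
      rcases List.mem_cons.mp hm with h | h
      · rw [h]
      · have h1 : w a ≤ w m := hmax a (List.mem_cons_self) hpa
        have h2 : w m ≤ w a := (List.pairwise_cons.mp hpair).1 m h
        have := huniq a List.mem_cons_self hpa (Nat.le_antisymm h1 h2)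
        rw [this]
    · simp only [Bool.not_eq_true] at hpa
      simp only [hpa]
      have hm' : m ∈ t := by
        rcases List.mem_cons.mp hm with h | h
        · exact absurd (h ▸ hpm) (by simp [hpa])
        · exact h
      exact ih (List.pairwise_cons.mp hpair).2 hm'
        (fun x hx => hmax x (List.mem_cons_of_mem a hx))
        (fun x hx => huniq x (List.mem_cons_of_mem a hx))

theorem pvMem_ancestors (f p : List Char) :
    p ∈ pvAncestors f ↔ ∃ i : Nat, i < f.length ∧ f[i]? = some '/' ∧ p = f.take i := by
  unfold pvAncestors
  constructor
  · intro hp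
    obtain ⟨ic, hic, hslice⟩ := List.mem_map.mp hp
    obtain ⟨hmem, hsl⟩ := List.mem_filter.mp hic
    obtain ⟨k, hk, hkeq⟩ := (PySem.List.mem_enumerate_iff f 0 ic).mp hmem
    subst hkeq
    refine ⟨k, hk, ?_, ?_⟩
    · rw [List.getElem?_eq_getElem hk]
      simpa using hsl
    · rw [← hslice, PySem.Chars.slice_eq_listSlice]
      have hs : PySem.List.slice f none (some ((0 + (k:Int), f[k]).1)) =
          List.take ((0:Int) + (k:Int)).toNat f := PySem.List.slice_to f (by omega)
      rw [hs]
      congr 1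
      omega
  · rintro ⟨i, hi, hslash, hp⟩
    refine List.mem_map.mpr ⟨((i : Int), '/'), List.mem_filter.mpr ⟨?_, by simp⟩, ?_⟩
    · refine (PySem.List.mem_enumerate_iff f 0 _).mpr ⟨i, hi, ?_⟩
      rw [List.getElem?_eq_getElem hi] at hslash
      have : f[i] = '/' := by simpa using hslash
      simp [this]
    · rw [PySem.Chars.slice_eq_listSlice]
      have hs : PySem.List.slice f none (some (((i:Int), '/').1)) =
          List.take ((i:Int)).toNat f := PySem.List.slice_to f (by omega)
      rw [hs, hp]
      congr 1

theorem pvMem_cand (f p : List Char) :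
    p ∈ (f :: (pvAncestors f).reverse) ↔ pvIsCand f p := by
  rw [List.mem_cons, List.mem_reverse, pvMem_ancestors]
  rfl

theorem pvMatchA_iff (f d : List Char) : pvMatchA f d = true ↔ pvIsCand f d := by
  unfold pvMatchA pvIsCand
  rw [Bool.or_eq_true, beq_iff_eq, PySem.Chars.startswith_iff]
  constructor
  · rintro (⟨t, ht⟩ | h)
    · right
      refine ⟨d.length, ?_, ?_, ?_⟩
      · rw [← ht]
        simp only [List.append_assoc, List.length_append, List.length_cons]
        omega
      · rw [← ht, List.append_assoc, List.getElem?_append_right (Nat.le_refl _)]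
        simp
      · rw [← ht, List.append_assoc]
        rw [List.take_left]
    · left
      exact h.symm
  · rintro (h | ⟨i, hi, hslash, hd⟩)
    · right
      exact h.symm
    · left
      refine ⟨f.drop (i + 1), ?_⟩
      have htake : f.take i ++ ['/'] = f.take (i + 1) := by
        rw [List.take_add_one, hslash]
        rfl
      rw [hd, htake, List.take_append_drop]

theorem pvCand_take {f p : List Char} (h : pvIsCand f p) :
    p = f.take p.length ∧ p.length ≤ f.length := by
  rcases h with h | ⟨i, hi, _, hp⟩
  · subst h; simp
  · subst hp
    constructor
    · rw [List.length_take]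
      congr 1
      omega
    · simp

theorem pvCand_uniq {f p q : List Char} (hp : pvIsCand f p) (hq : pvIsCand f q)
    (hlen : p.length = q.length) : p = q := by
  rw [(pvCand_take hp).1, (pvCand_take hq).1, hlen]

theorem pvEnum_pairwise (xs : List Char) (s : Int) :
    (PySem.List.enumerate xs s).Pairwise (fun a b => a.1 < b.1) := by
  induction xs generalizing s with
  | nil => simp [PySem.List.enumerate]
  | cons x t ih =>
    rw [show PySem.List.enumerate (x::t) s = (s, x) :: PySem.List.enumerate t (s+1) by
      simp [PySem.List.enumerate]]
    refine List.pairwise_cons.mpr ⟨?_, ih (s+1)⟩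
    intro a ha
    rcases (PySem.List.mem_enumerate_iff t (s+1) a).mp ha with ⟨k, hk, hak⟩
    rw [hak]
    simp only
    omega

theorem pvCand_pairwise (f : List Char) :
    (f :: (pvAncestors f).reverse).Pairwise (fun a b => b.length ≤ a.length) := by
  refine List.pairwise_cons.mpr ⟨?_, ?_⟩
  · intro p hp
    rcases (pvMem_ancestors f p).mp (List.mem_reverse.mp hp) with ⟨i, hi, _, hp'⟩
    rw [hp']
    simp
  · rw [List.pairwise_reverse]
    unfold pvAncestors
    rw [List.pairwise_map]
    have base := (pvEnum_pairwise f 0).filter (fun ic => ic.2 == '/')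
    refine base.imp_of_mem ?_
    intro a b ha hb hab
    have hma := List.mem_filter.mp ha
    have hmb := List.mem_filter.mp hb
    rcases (PySem.List.mem_enumerate_iff f 0 a).mp hma.1 with ⟨ka, hka, haeq⟩
    rcases (PySem.List.mem_enumerate_iff f 0 b).mp hmb.1 with ⟨kb, hkb, hbeq⟩
    rw [haeq, hbeq] at hab ⊢
    simp only at hab ⊢
    rw [PySem.Chars.slice_eq_listSlice, PySem.Chars.slice_eq_listSlice]
    have hsa : PySem.List.slice f none (some ((0:Int) + (ka:Int))) =
        List.take ((0:Int) + (ka:Int)).toNat f := PySem.List.slice_to f (by omega)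
    have hsb : PySem.List.slice f none (some ((0:Int) + (kb:Int))) =
        List.take ((0:Int) + (kb:Int)).toNat f := PySem.List.slice_to f (by omega)
    rw [hsa, hsb, List.length_take, List.length_take]
    omega

-- the per-file inner searches agree
theorem pvInner (dict : PySem.Dict String String) (f : List Char) :
    ((PySem.List.sorted dict.keys (fun s => PySem.Str.len s) true).find?
        (fun cd => pvMatchA f cd.toList)).map (fun cd => dict.getD cd "")
      = (f :: (pvAncestors f).reverse).findSome? (fun p => dict.get? (String.ofList p)) := by
  by_cases hex : ∃ d ∈ dict.keys, pvMatchA f d.toList = true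
  · -- some crate dir matches: both sides return the value of the longest match
    set M := dict.keys.filter (fun d => pvMatchA f d.toList) with hM
    have hMne : M ≠ [] := by
      rcases hex with ⟨d, hd, hmd⟩
      intro hnil
      have : d ∈ M := List.mem_filter.mpr ⟨hd, hmd⟩
      rw [hnil] at this
      cases this
    obtain ⟨m, hmarg⟩ : ∃ m, m ∈ List.argmax (fun d : String => d.toList.length) M := by
      cases harg : List.argmax (fun d : String => d.toList.length) M with
      | none => exact absurd (List.argmax_eq_none.mp harg) hMne
      | some m => exact ⟨m, Option.mem_def.mpr rfl⟩
    have hmM : m ∈ M := List.argmax_mem hmarg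
    have hmkeys : m ∈ dict.keys := (List.mem_filter.mp hmM).1
    have hmmatch : pvMatchA f m.toList = true := (List.mem_filter.mp hmM).2
    have hmax : ∀ x ∈ dict.keys, pvMatchA f x.toList = true → x.toList.length ≤ m.toList.length := by
      intro x hx hmx
      exact List.le_of_mem_argmax (f := fun d : String => d.toList.length) (List.mem_filter.mpr ⟨hx, hmx⟩) hmarg
    have huniq : ∀ x : String, pvMatchA f x.toList = true → x.toList.length = m.toList.length → x = m := by
      intro x hmx hlen
      have := pvCand_uniq ((pvMatchA_iff f x.toList).mp hmx) ((pvMatchA_iff f m.toList).mp hmmatch) hlen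
      exact String.toList_inj.mp this
    -- left side
    have hA : (PySem.List.sorted dict.keys (fun s => PySem.Str.len s) true).find?
        (fun cd => pvMatchA f cd.toList) = some m := by
      apply pvFirstHit (w := fun s => s.toList.length)
      · have := PySem.List.sorted_pairwise_rev dict.keys (fun s => PySem.Str.len s)
        refine this.imp ?_
        intro a b h
        rw [PySem.Str.len_eq, PySem.Str.len_eq] at h
        exact_mod_cast h
      · exact (PySem.List.mem_sorted ..).mpr hmkeys
      · exact hmmatch
      · intro x hx hmx
        exact hmax x ((PySem.List.mem_sorted ..).mp hx) hmx
      · intro x _ hmx hlen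
        exact huniq x hmx hlen
    -- right side
    obtain ⟨v, hv⟩ : ∃ v, dict.get? m = some v := by
      cases hg : dict.get? m with
      | none => exact absurd ((PySem.Dict.get?_eq_none_iff_not_mem_keys ..).mp hg) (by simp [hmkeys])
      | some v => exact ⟨v, rfl⟩
    have hB : (f :: (pvAncestors f).reverse).find?
        (fun p => (dict.get? (String.ofList p)).isSome) = some m.toList := by
      apply pvFirstHit (w := fun p => p.length)
      · exact pvCand_pairwise f
      · exact (pvMem_cand f m.toList).mpr ((pvMatchA_iff f m.toList).mp hmmatch)
      · rw [String.ofList_toList, hv]; rfl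
      · intro x hx hsx
        have hxkeys : String.ofList x ∈ dict.keys := by
          by_contra hc
          rw [(PySem.Dict.get?_eq_none_iff_not_mem_keys ..).mpr hc] at hsx
          cases hsx
        have hxmatch : pvMatchA f (String.ofList x).toList = true := by
          rw [String.toList_ofList]
          exact (pvMatchA_iff f x).mpr ((pvMem_cand f x).mp hx)
        have := hmax _ hxkeys hxmatch
        rw [String.toList_ofList] at this
        exact this
      · intro x hx hsx hlen
        have hc := (pvMem_cand f x).mp hx
        have := pvCand_uniq hc ((pvMatchA_iff f m.toList).mp hmmatch) hlen
        exact this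
    rw [hA, pvFindSome?_eq_bind, hB]
    simp only [Option.map_some, Option.bind_some, String.ofList_toList, hv]
    rw [PySem.Dict.getD_of_get?_eq_some dict "" hv]
  · -- no crate dir matches: both sides return none
    simp only [not_exists, not_and] at hex
    rw [List.find?_eq_none.mpr, pvFindSome?_eq_bind, List.find?_eq_none.mpr]
    · rfl
    · intro p hp
      simp only [Bool.not_eq_true, Option.isSome_eq_false_iff, Option.isNone_iff_eq_none]
      rw [PySem.Dict.get?_eq_none_iff_not_mem_keys]
      intro hmem
      have := hex (String.ofList p) hmem
      rw [String.toList_ofList] at this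
      exact this ((pvMatchA_iff f p).mpr ((pvMem_cand f p).mp hp))
    · intro x hx
      simp only [Bool.not_eq_true]
      have hxk := (PySem.List.mem_sorted ..).mp hx
      have := hex x hxk
      simp [this]

-- ===== VERDICT (by name: the statement is the Claim_ definition above) =====
theorem changed_files_to_crates_spec : Claim_equal_changed_files_to_crates := by
  intro changed_files dir_to_name _
  unfold Spec_changed_files_to_crates changed_files_to_crates changed_files_to_crates_alt
  simp only
  apply PySem.List.foldl_congr_mem
  intro acc f _
  have h := pvInner (PySem.Dict.ofList dir_to_name) f.toList
  cases hA : (PySem.List.sorted (PySem.Dict.ofList dir_to_name).keys (fun s => PySem.Str.len s) true).find?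
      (fun cd => pvMatchA f.toList cd.toList) with
  | none =>
    rw [hA] at h
    simp only [Option.map_none] at h
    rw [← h]
  | some cd =>
    rw [hA] at h
    simp only [Option.map_some] at h
    rw [← h]
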